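-- pv_equiv track=rewrite | github.com/jstone-lucasfilm/MaterialX | python/Scripts/mxspec.py | isValidTypeGroupAssignment
-- ===== SOURCE A (Python) =====
-- def isValidTypeGroupAssignment(driverNames, combo, typeGroupAliases):
--     '''
--     Check if type assignments satisfy group constraints (e.g., colorN ports must
--     match, colorM must differ from colorN). Returns a dict or None.
--     '''
--     typeAssignment = {}
--     groupAssignments = {}  # groupName -> concreteType assigned to that group
--
--     for name, (concreteType, groupName) in zip(driverNames, combo):
--         typeAssignment[name] = concreteType
--
--         # Skip constraint checking for None types (these will be resolved via typeRef)
--         if concreteType is None: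
--             continue
--
--         if not groupName:
--             continue
--
--         # For group aliases (colorM), get the base group (colorN)
--         baseGroup = typeGroupAliases.get(groupName, groupName)
--         isAlias = groupName in typeGroupAliases
--
--         # Check consistency: all uses of the same group must have same concrete type
--         if groupName in groupAssignments:
--             if groupAssignments[groupName] != concreteType:
--                 return None
--         else:
--             groupAssignments[groupName] = concreteType
--
--         # Aliases and their base groups must differ in concrete type
--         if isAlias and baseGroup in groupAssignments:
--             if groupAssignments[baseGroup] == concreteType:
--                 return None
--         if not isAlias:
--             for alias, base in typeGroupAliases.items():
--                 if base == groupName and alias in groupAssignments: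
--                     if groupAssignments[alias] == concreteType:
--                         return None
--
--     return typeAssignment
-- ===== SOURCE B (Python) =====
-- def isValidTypeGroupAssignment(driverNames, combo, typeGroupAliases):
--     '''
--     Check if type assignments satisfy group constraints (e.g., colorN ports must
--     match, colorM must differ from colorN). Returns a dict or None.
--     Two staged passes: collect the set of concrete types used by each group,
--     then validate group consistency and alias/base disjointness globally.
--     '''
--     groupTypes = {}
--     for _, (concreteType, groupName) in zip(driverNames, combo):
--         if concreteType is not None and groupName:
--             groupTypes.setdefault(groupName, set()).add(concreteType)
--
--     for types in groupTypes.values():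
--         if len(types) > 1:
--             return None
--
--     for alias, base in typeGroupAliases.items():
--         if alias in groupTypes and base in groupTypes:
--             if groupTypes[alias] & groupTypes[base]:
--                 return None
--
--     return {name: concreteType for name, (concreteType, _) in zip(driverNames, combo)}
-- ===== Notes on version B (the rewrite author's own statement) =====
-- stated objective: faster
-- what changed: A runs one stateful pass with eager early returns, caching the first-seen concrete type per group and rescanning the whole alias table at every non-alias entry; B makes two staged passes: it first collects the SET of concrete types used by each group, then validates globally that every group's set is a singleton and that no alias/base pair of groups shares a type. Pre_ excludes chained alias tables (an entry whose base is itself a distinct alias key), on which A's per-entry check is order-dependent and accidentally misses alias/base conflicts.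
import Mathlib
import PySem

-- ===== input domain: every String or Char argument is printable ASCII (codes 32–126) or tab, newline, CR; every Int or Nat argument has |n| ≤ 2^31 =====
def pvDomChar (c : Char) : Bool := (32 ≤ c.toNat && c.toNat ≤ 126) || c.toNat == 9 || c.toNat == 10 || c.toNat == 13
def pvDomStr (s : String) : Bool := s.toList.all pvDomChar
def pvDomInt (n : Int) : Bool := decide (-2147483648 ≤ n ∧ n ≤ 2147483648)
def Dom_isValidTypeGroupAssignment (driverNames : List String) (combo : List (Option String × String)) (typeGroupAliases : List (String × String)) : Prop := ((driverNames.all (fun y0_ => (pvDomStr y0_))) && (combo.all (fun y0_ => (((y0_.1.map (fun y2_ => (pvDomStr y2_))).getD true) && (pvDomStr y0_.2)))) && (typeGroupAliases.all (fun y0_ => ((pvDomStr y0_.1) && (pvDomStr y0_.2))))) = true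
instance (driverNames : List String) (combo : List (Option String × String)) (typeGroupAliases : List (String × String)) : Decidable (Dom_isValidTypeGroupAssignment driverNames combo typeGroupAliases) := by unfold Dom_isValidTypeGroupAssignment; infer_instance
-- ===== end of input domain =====

-- B replaces A's single stateful pass (first-seen type per group, alias table rescanned per
-- entry) by two staged passes: collect the set of concrete types per group, then validate group
-- consistency and alias/base disjointness globally (objective: faster, measured by the check).

-- ===== PORT A =====
-- A's inner 'for alias, base in typeGroupAliases.items()' loop with early return
def pvScanA (ga : PySem.Dict String String) (ct g : String) : List (String × String) → Bool
  | [] => false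
  | (a, b) :: rest =>
    if b == g && (match ga.get? a with | some v => v == ct | none => false) then true
    else pvScanA ga ct g rest

-- A's main loop over zip(driverNames, combo), threading typeAssignment and groupAssignments
def pvGoA (aliases : PySem.Dict String String) :
    List (String × (Option String × String)) → PySem.Dict String (Option String) →
    PySem.Dict String String → Option (PySem.Dict String (Option String))
  | [], ta, _ => some ta
  | (name, (concreteType, groupName)) :: rest, ta, ga =>
    let ta' := ta.insert name concreteType
    match concreteType with
    | none => pvGoA aliases rest ta' ga
    | some ct =>
      if groupName == "" then pvGoA aliases rest ta' ga
      else
        let baseGroup := aliases.getD groupName groupName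
        let isAlias := aliases.contains groupName
        if (match ga.get? groupName with | some v => v != ct | none => false) then none
        else
          let ga' := if ga.contains groupName then ga else ga.insert groupName ct
          if isAlias && (match ga'.get? baseGroup with | some v => v == ct | none => false) then none
          else if !isAlias && pvScanA ga' ct groupName aliases.items then none
          else pvGoA aliases rest ta' ga'

def isValidTypeGroupAssignment (driverNames : List String) (combo : List (Option String × String)) (typeGroupAliases : List (String × String)) : Option (List (String × Option String)) :=
  let aliases := PySem.Dict.ofList typeGroupAliases
  match pvGoA aliases (driverNames.zip combo) PySem.Dict.empty PySem.Dict.empty with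
  | some ta => some ta.items
  | none => none

-- ===== PORT B =====
-- B's first pass: groupTypes.setdefault(groupName, set()).add(concreteType)
def pvGTstep (d : PySem.Dict String (PySem.Set String)) (e : String × (Option String × String)) : PySem.Dict String (PySem.Set String) :=
  match e.2.1 with
  | some t => if e.2.2 == "" then d else d.modify e.2.2 PySem.Set.empty (fun s => PySem.Set.add s t)
  | none => d

def pvGroupTypes (entries : List (String × (Option String × String))) : PySem.Dict String (PySem.Set String) :=
  entries.foldl pvGTstep PySem.Dict.empty

def isValidTypeGroupAssignment_alt (driverNames : List String) (combo : List (Option String × String)) (typeGroupAliases : List (String × String)) : Option (List (String × Option String)) :=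
  let entries := driverNames.zip combo
  let gt := pvGroupTypes entries
  -- second pass: any group with more than one concrete type is inconsistent
  if gt.values.any (fun s => decide (1 < PySem.Set.len s)) then none
  -- third pass: an alias and its base group must not share a concrete type
  else if (PySem.Dict.ofList typeGroupAliases).items.any (fun p =>
      gt.contains p.1 && gt.contains p.2 &&
      !(PySem.Set.inter (gt.getD p.1 PySem.Set.empty) (gt.getD p.2 PySem.Set.empty)).isEmpty) then none
  else some ((entries.foldl (fun d e => d.insert e.1 e.2.1) PySem.Dict.empty)).items

-- ===== PRECONDITION & SPEC =====
-- Pre_ excludes chained alias tables (an entry whose base group is itself a distinct alias key),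
-- on which A's constraint check is order-dependent: checks for an alias consult only its own base,
-- so a conflict between an alias and its base slips through when the base (itself an alias) is
-- assigned after the alias. Real alias tables (colorM -> colorN) are never chained.
def Pre_isValidTypeGroupAssignment (driverNames : List String) (combo : List (Option String × String)) (typeGroupAliases : List (String × String)) : Prop :=
  ∀ p ∈ (PySem.Dict.ofList typeGroupAliases).items,
    p.2 = p.1 ∨ (PySem.Dict.ofList typeGroupAliases).contains p.2 = false
instance (driverNames : List String) (combo : List (Option String × String)) (typeGroupAliases : List (String × String)) : Decidable (Pre_isValidTypeGroupAssignment driverNames combo typeGroupAliases) := by unfold Pre_isValidTypeGroupAssignment; infer_instance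

def pvWitness_isValidTypeGroupAssignment : List String × (List (Option String × String)) × (List (String × String)) :=
  (["x", "y"], [(some "color3", "g1"), (some "float", "g2")], [("g2", "g1")])

def Spec_isValidTypeGroupAssignment (driverNames : List String) (combo : List (Option String × String)) (typeGroupAliases : List (String × String)) (out : Option (List (String × Option String))) : Prop := out = isValidTypeGroupAssignment_alt driverNames combo typeGroupAliases
instance (driverNames : List String) (combo : List (Option String × String)) (typeGroupAliases : List (String × String)) (out : Option (List (String × Option String))) : Decidable (Spec_isValidTypeGroupAssignment driverNames combo typeGroupAliases out) := by unfold Spec_isValidTypeGroupAssignment; infer_instance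

-- ===== CLAIM (what is proved, stated in full; the proofs are below) =====
def Claim_equal_isValidTypeGroupAssignment : Prop := ∀ (driverNames : List String) (combo : List (Option String × String)) (typeGroupAliases : List (String × String)), Dom_isValidTypeGroupAssignment driverNames combo typeGroupAliases → Pre_isValidTypeGroupAssignment driverNames combo typeGroupAliases → Spec_isValidTypeGroupAssignment driverNames combo typeGroupAliases (isValidTypeGroupAssignment driverNames combo typeGroupAliases)

-- ===== LEMMAS AND PROOFS =====

-- Proof bridge: an intermediate prefix-incremental judge of the active (group, type) uses.
-- A is shown equal to it (pvGoA_eq_goB), and it is shown equal to B's global two-pass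
-- verdict under Pre_ (no chained aliases).
def pvFirstType : List (String × String) → String → Option String
  | [], _ => none
  | (g', t') :: rest, g => if g' == g then some t' else pvFirstType rest g

def pvScanB (pre : List (String × String)) (t g : String) : List (String × String) → Bool
  | [] => false
  | (a, b) :: rest =>
    if b == g && pvFirstType pre a == some t then true
    else pvScanB pre t g rest

def pvGoB (aliases : PySem.Dict String String) :
    List (String × String) → List (String × String) → Bool
  | _, [] => true
  | pre, (g, t) :: rest =>
    if (match pvFirstType pre g with | some v => v != t | none => false) then false
    else if aliases.contains g then
      let b := aliases.getD g g
      if b == g then false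
      else if pvFirstType pre b == some t then false
      else pvGoB aliases (pre ++ [(g, t)]) rest
    else if pvScanB pre t g aliases.items then false
    else pvGoB aliases (pre ++ [(g, t)]) rest

def pvActive (entries : List (String × (Option String × String))) : List (String × String) :=
  entries.filterMap (fun e =>
    match e.2.1 with
    | some ct => if e.2.2 == "" then none else some (e.2.2, ct)
    | none => none)

-- global validity properties (order-free, membership-based)
def pvCons (l : List (String × String)) : Prop := ∀ p ∈ l, ∀ q ∈ l, p.1 = q.1 → p.2 = q.2
def pvConf (d : PySem.Dict String String) (l : List (String × String)) : Prop :=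
  ∃ p ∈ d.items, ∃ t, (p.1, t) ∈ l ∧ (p.2, t) ∈ l

theorem pvFirstType_append (pre : List (String × String)) (g ct g' : String) :
    pvFirstType (pre ++ [(g, ct)]) g' =
      match pvFirstType pre g' with
      | some v => some v
      | none => if g == g' then some ct else none := by
  induction pre with
  | nil => simp [pvFirstType]
  | cons p rest ih =>
    obtain ⟨pg, pt⟩ := p
    by_cases h : pg == g'
    · simp [pvFirstType, h]
    · simp [pvFirstType, h, ih]

theorem pvFirstType_mem (pre : List (String × String)) (g t : String)
    (h : pvFirstType pre g = some t) : (g, t) ∈ pre := by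
  induction pre with
  | nil => simp [pvFirstType] at h
  | cons p rest ih =>
    obtain ⟨pg, pt⟩ := p
    by_cases e : pg == g
    · simp only [pvFirstType, e, if_true, Option.some.injEq] at h
      have epg : pg = g := by simpa using e
      subst epg; subst h; exact List.mem_cons_self
    · simp only [pvFirstType, e, if_false] at h
      exact List.mem_cons_of_mem _ (ih h)

theorem pvFirstType_isSome (pre : List (String × String)) (g t : String)
    (h : (g, t) ∈ pre) : (pvFirstType pre g).isSome := by
  induction pre with
  | nil => simp at h
  | cons p rest ih =>
    obtain ⟨pg, pt⟩ := p
    by_cases e : pg == g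
    · simp [pvFirstType, e]
    · rcases List.mem_cons.mp h with h1 | h2
      · exfalso; apply absurd e; simp; injection h1 with h1a h1b; exact h1a.symm ▸ rfl
      · simpa [pvFirstType, e] using ih h2

theorem pvFirstType_of_cons (pre : List (String × String)) (g t : String)
    (hc : pvCons pre) (h : (g, t) ∈ pre) : pvFirstType pre g = some t := by
  cases hf : pvFirstType pre g with
  | none => exact absurd (hf ▸ pvFirstType_isSome pre g t h) (by simp)
  | some v =>
    have hv : (g, v) ∈ pre := pvFirstType_mem pre g v hf
    have := hc (g, v) hv (g, t) h rfl
    simp at this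
    rw [this]

theorem pvScanB_iff (pre : List (String × String)) (t g : String) (items : List (String × String)) :
    pvScanB pre t g items = true ↔ ∃ p ∈ items, p.2 = g ∧ pvFirstType pre p.1 = some t := by
  induction items with
  | nil => simp [pvScanB]
  | cons p rest ih =>
    obtain ⟨a, b⟩ := p
    by_cases hb : b = g
    · by_cases hft : pvFirstType pre a = some t
      · simp [pvScanB, hb, hft]
      · have : (pvFirstType pre a == some t) = false := by simpa using hft
        simp only [pvScanB, hb, beq_self_eq_true, this, Bool.and_false, Bool.false_eq_true,
          if_false, ih]
        constructor
        · rintro ⟨q, hq, h1, h2⟩; exact ⟨q, List.mem_cons_of_mem _ hq, h1, h2⟩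
        · rintro ⟨q, hq, h1, h2⟩
          rcases List.mem_cons.mp hq with rfl | hq'
          · exact absurd h2 hft
          · exact ⟨q, hq', h1, h2⟩
    · have : (b == g) = false := by simpa using hb
      simp only [pvScanB, this, Bool.false_and, Bool.false_eq_true, if_false, ih]
      constructor
      · rintro ⟨q, hq, h1, h2⟩; exact ⟨q, List.mem_cons_of_mem _ hq, h1, h2⟩
      · rintro ⟨q, hq, h1, h2⟩
        rcases List.mem_cons.mp hq with rfl | hq'
        · exact absurd h1 hb
        · exact ⟨q, hq', h1, h2⟩

theorem pvConsM (pre : List (String × String)) (g t : String) (hc : pvCons pre)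
    (hft : ∀ v, pvFirstType pre g = some v → v = t) : pvCons (pre ++ [(g, t)]) := by
  have key : ∀ p2, (g, p2) ∈ pre → p2 = t := fun p2 h =>
    hft p2 (pvFirstType_of_cons pre g p2 hc h)
  rintro ⟨p1, p2⟩ hp ⟨q1, q2⟩ hq heq
  simp only at heq
  rcases List.mem_append.mp hp with h1 | h1 <;> rcases List.mem_append.mp hq with h2 | h2
  · exact hc _ h1 _ h2 heq
  · simp only [List.mem_singleton, Prod.mk.injEq] at h2
    show p2 = q2
    rw [h2.2]
    exact key p2 (by rw [← h2.1, ← heq]; exact h1)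
  · simp only [List.mem_singleton, Prod.mk.injEq] at h1
    show p2 = q2
    rw [h1.2]
    exact (key q2 (by rw [← h1.1, heq]; exact h2)).symm
  · simp only [List.mem_singleton, Prod.mk.injEq] at h1 h2
    show p2 = q2
    rw [h1.2, h2.2]

theorem pvConfM_alias (d : PySem.Dict String String) (hnd : d.keys.Nodup)
    (hpre : ∀ p ∈ d.items, p.2 = p.1 ∨ d.contains p.2 = false)
    (pre : List (String × String)) (g t b : String)
    (hc : pvCons pre) (hf : ¬ pvConf d pre)
    (hal : d.contains g = true) (hb : d.get? g = some b) (hbg : b ≠ g)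
    (hftb : pvFirstType pre b ≠ some t) :
    ¬ pvConf d (pre ++ [(g, t)]) := by
  rintro ⟨⟨a1, a2⟩, hp, s, h1, h2⟩
  rcases List.mem_append.mp h1 with m1 | m1 <;> rcases List.mem_append.mp h2 with m2 | m2
  · exact hf ⟨(a1, a2), hp, s, m1, m2⟩
  · -- the base slot (a2, s) is the new use (g, t)
    simp only [List.mem_singleton, Prod.mk.injEq] at m2
    rcases hpre (a1, a2) hp with hq | hq
    · -- a self pair (g, g) would force b = g
      simp only at hq
      have e1 : a1 = g := by rw [← hq, m2.1]
      rw [e1, m2.1] at hp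
      have := PySem.Dict.get?_of_mem_items d hp hnd
      rw [hb] at this
      exact hbg (by simpa using this)
    · simp only at hq
      rw [m2.1, hal] at hq
      exact absurd hq (by simp)
  · -- the alias slot (a1, s) is the new use (g, t): then a2 = b and (b, t) ∈ pre
    simp only [List.mem_singleton, Prod.mk.injEq] at m1
    have hget := PySem.Dict.get?_of_mem_items d hp hnd
    rw [m1.1, hb] at hget
    have ha2 : a2 = b := by simpa using hget.symm
    rw [ha2, m1.2] at m2
    exact hftb (pvFirstType_of_cons pre b t hc m2)
  · simp only [List.mem_singleton, Prod.mk.injEq] at m1 m2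
    rw [m1.1, m2.1] at hp
    have := PySem.Dict.get?_of_mem_items d hp hnd
    rw [hb] at this
    exact hbg (by simpa using this)

theorem pvConfM_scan (d : PySem.Dict String String)
    (pre : List (String × String)) (g t : String)
    (hc : pvCons pre) (hf : ¬ pvConf d pre)
    (haf : d.contains g = false) (hs : pvScanB pre t g d.items = false) :
    ¬ pvConf d (pre ++ [(g, t)]) := by
  rintro ⟨⟨a1, a2⟩, hp, s, h1, h2⟩
  have hkg : a1 ≠ g := by
    intro e
    have hm := PySem.Dict.mem_keys_of_mem_items d hp
    rw [e, ← PySem.Dict.contains_iff_mem_keys, haf] at hm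
    exact Bool.false_ne_true hm
  rcases List.mem_append.mp h1 with m1 | m1
  · rcases List.mem_append.mp h2 with m2 | m2
    · exact hf ⟨(a1, a2), hp, s, m1, m2⟩
    · simp only [List.mem_singleton, Prod.mk.injEq] at m2
      have : pvScanB pre t g d.items = true :=
        (pvScanB_iff pre t g d.items).mpr
          ⟨(a1, a2), hp, m2.1, pvFirstType_of_cons pre a1 t hc (by rw [← m2.2]; exact m1)⟩
      rw [hs] at this; exact Bool.false_ne_true this
  · simp only [List.mem_singleton, Prod.mk.injEq] at m1
    exact hkg m1.1

-- core A-side lemma: the incremental judge computes the global properties, under Pre_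
theorem pvGoB_iff_valid (d : PySem.Dict String String) (hnd : d.keys.Nodup)
    (hpre : ∀ p ∈ d.items, p.2 = p.1 ∨ d.contains p.2 = false) :
    ∀ (l pre : List (String × String)), pvCons pre → ¬ pvConf d pre →
      (pvGoB d pre l = true ↔ (pvCons (pre ++ l) ∧ ¬ pvConf d (pre ++ l))) := by
  intro l
  induction l with
  | nil =>
    intro pre hc hf
    simpa [pvGoB] using ⟨hc, hf⟩
  | cons e rest ih =>
    intro pre hc hf
    obtain ⟨g, t⟩ := e
    have hgL : (g, t) ∈ pre ++ (g, t) :: rest :=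
      List.mem_append.mpr (Or.inr List.mem_cons_self)
    have hL : (pre ++ [(g, t)]) ++ rest = pre ++ (g, t) :: rest := by simp
    cases hft : pvFirstType pre g with
    | some v =>
      by_cases hv : v = t
      case neg =>
        have hgv : (g, v) ∈ pre := pvFirstType_mem pre g v hft
        have hnc : ¬ pvCons (pre ++ (g, t) :: rest) := fun h =>
          hv (h (g, v) (List.mem_append.mpr (Or.inl hgv)) (g, t) hgL rfl)
        have hne : (v != t) = true := by simpa using hv
        simp [pvGoB, hft, hne, hnc]
      case pos =>
        rw [hv] at hft
        have hconsM : pvCons (pre ++ [(g, t)]) :=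
          pvConsM pre g t hc (fun w hw => by rw [hft] at hw; simpa using hw.symm)
        by_cases hal : d.contains g = true
        · obtain ⟨b, hb⟩ : ∃ b, d.get? g = some b := by
            rw [PySem.Dict.contains_eq_isSome_get?] at hal
            exact Option.isSome_iff_exists.mp hal
          have hgetD : d.getD g g = b := PySem.Dict.getD_of_get?_eq_some d g hb
          have hbitems : (g, b) ∈ d.items := PySem.Dict.mem_items_of_get?_eq_some d hb
          by_cases hbg : b = g
          · -- self-alias: the judge refuses; globally (g, g) conflicts with itself
            have hcf : pvConf d (pre ++ (g, t) :: rest) :=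
              ⟨(g, b), hbitems, t, hgL, by rw [hbg]; exact hgL⟩
            have hbeq : (b == g) = true := by simp [hbg]
            simp [pvGoB, hft, hal, hgetD, hbeq, hcf]
          · by_cases hftb : pvFirstType pre b = some t
            · have hbL : (b, t) ∈ pre ++ (g, t) :: rest :=
                List.mem_append.mpr (Or.inl (pvFirstType_mem pre b t hftb))
              have hcf : pvConf d (pre ++ (g, t) :: rest) := ⟨(g, b), hbitems, t, hgL, hbL⟩
              have hbne : (b == g) = false := by simpa using hbg
              simp [pvGoB, hft, hal, hgetD, hbne, hftb, hcf]
            · have hconfM := pvConfM_alias d hnd hpre pre g t b hc hf hal hb hbg hftb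
              have hrec := ih (pre ++ [(g, t)]) hconsM hconfM
              rw [hL] at hrec
              have hbne : (b == g) = false := by simpa using hbg
              have hfne : (pvFirstType pre b == some t) = false := by simpa using hftb
              simp [pvGoB, hft, hal, hgetD, hbne, hfne, hrec]
        · have haf : d.contains g = false := by simpa using hal
          cases hs : pvScanB pre t g d.items with
          | true =>
            obtain ⟨p, hp, hpg, hpt⟩ := (pvScanB_iff pre t g d.items).mp hs
            have haL : (p.1, t) ∈ pre ++ (g, t) :: rest :=
              List.mem_append.mpr (Or.inl (pvFirstType_mem pre p.1 t hpt))
            have hcf : pvConf d (pre ++ (g, t) :: rest) :=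
              ⟨p, hp, t, haL, by rw [hpg]; exact hgL⟩
            simp [pvGoB, hft, haf, hs, hcf]
          | false =>
            have hconfM := pvConfM_scan d pre g t hc hf haf hs
            have hrec := ih (pre ++ [(g, t)]) hconsM hconfM
            rw [hL] at hrec
            simp [pvGoB, hft, haf, hs, hrec]
    | none =>
      have hconsM : pvCons (pre ++ [(g, t)]) :=
        pvConsM pre g t hc (fun w hw => by rw [hft] at hw; cases hw)
      by_cases hal : d.contains g = true
      · obtain ⟨b, hb⟩ : ∃ b, d.get? g = some b := by
          rw [PySem.Dict.contains_eq_isSome_get?] at hal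
          exact Option.isSome_iff_exists.mp hal
        have hgetD : d.getD g g = b := PySem.Dict.getD_of_get?_eq_some d g hb
        have hbitems : (g, b) ∈ d.items := PySem.Dict.mem_items_of_get?_eq_some d hb
        by_cases hbg : b = g
        · have hcf : pvConf d (pre ++ (g, t) :: rest) :=
            ⟨(g, b), hbitems, t, hgL, by rw [hbg]; exact hgL⟩
          have hbeq : (b == g) = true := by simp [hbg]
          simp [pvGoB, hft, hal, hgetD, hbeq, hcf]
        · by_cases hftb : pvFirstType pre b = some t
          · have hbL : (b, t) ∈ pre ++ (g, t) :: rest :=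
              List.mem_append.mpr (Or.inl (pvFirstType_mem pre b t hftb))
            have hcf : pvConf d (pre ++ (g, t) :: rest) := ⟨(g, b), hbitems, t, hgL, hbL⟩
            have hbne : (b == g) = false := by simpa using hbg
            simp [pvGoB, hft, hal, hgetD, hbne, hftb, hcf]
          · have hconfM := pvConfM_alias d hnd hpre pre g t b hc hf hal hb hbg hftb
            have hrec := ih (pre ++ [(g, t)]) hconsM hconfM
            rw [hL] at hrec
            have hbne : (b == g) = false := by simpa using hbg
            have hfne : (pvFirstType pre b == some t) = false := by simpa using hftb
            simp [pvGoB, hft, hal, hgetD, hbne, hfne, hrec]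
      · have haf : d.contains g = false := by simpa using hal
        cases hs : pvScanB pre t g d.items with
        | true =>
          obtain ⟨p, hp, hpg, hpt⟩ := (pvScanB_iff pre t g d.items).mp hs
          have haL : (p.1, t) ∈ pre ++ (g, t) :: rest :=
            List.mem_append.mpr (Or.inl (pvFirstType_mem pre p.1 t hpt))
          have hcf : pvConf d (pre ++ (g, t) :: rest) :=
            ⟨p, hp, t, haL, by rw [hpg]; exact hgL⟩
          simp [pvGoB, hft, haf, hs, hcf]
        | false =>
          have hconfM := pvConfM_scan d pre g t hc hf haf hs
          have hrec := ih (pre ++ [(g, t)]) hconsM hconfM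
          rw [hL] at hrec
          simp [pvGoB, hft, haf, hs, hrec]

-- A equals the incremental judge (invariant: ga holds the first type of each group seen so far)
theorem pvScan_eq (ga : PySem.Dict String String) (pre : List (String × String)) (ct g : String) :
    ∀ l : List (String × String), (∀ p ∈ l, ga.get? p.1 = pvFirstType pre p.1) →
      pvScanA ga ct g l = pvScanB pre ct g l := by
  intro l
  induction l with
  | nil => intro _; rfl
  | cons p rest ih =>
    intro h
    obtain ⟨a, b⟩ := p
    have ha : ga.get? a = pvFirstType pre a := h (a, b) (by simp)
    have hrest : ∀ p ∈ rest, ga.get? p.1 = pvFirstType pre p.1 := fun p hp => h p (by simp [hp])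
    simp only [pvScanA, pvScanB, ha, ih hrest]
    cases pvFirstType pre a with
    | none => simp
    | some v =>
      by_cases hv : v = ct <;> simp [hv]

theorem pvGoA_eq_goB (aliases : PySem.Dict String String) :
    ∀ (rest : List (String × (Option String × String))) (pre : List (String × String))
      (ta : PySem.Dict String (Option String)) (ga : PySem.Dict String String),
      (∀ g, ga.get? g = pvFirstType pre g) →
      pvGoA aliases rest ta ga =
        if pvGoB aliases pre (pvActive rest) then
          some (rest.foldl (fun d e => d.insert e.1 e.2.1) ta) else none := by
  intro rest
  induction rest with
  | nil => intro pre ta ga h; simp [pvGoA, pvActive, pvGoB]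
  | cons e rest ih =>
    intro pre ta ga h
    obtain ⟨name, ct?, g⟩ := e
    cases ct? with
    | none => simpa [pvGoA, pvActive] using ih pre (ta.insert name none) ga h
    | some ct =>
      by_cases hg : g = ""
      · subst hg
        simpa [pvGoA, pvActive] using ih pre (ta.insert name (some ct)) ga h
      · have hgb : (g == "") = false := by simp [hg]
        simp only [pvGoA, pvActive, List.filterMap_cons, hgb, Bool.false_eq_true, if_false]
        simp only [pvGoB, List.foldl_cons]
        rw [h g]
        cases hft : pvFirstType pre g with
        | some v =>
          have hcg : ga.contains g = true := by
            rw [PySem.Dict.contains_eq_isSome_get?, h g, hft]; rfl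
          simp only [hcg, if_true]
          by_cases hv : v = ct
          · subst hv
            simp only [bne_self_eq_false, Bool.false_eq_true, if_false]
            have h' : ∀ g', ga.get? g' = pvFirstType (pre ++ [(g, v)]) g' := by
              intro g'
              rw [pvFirstType_append]
              cases hx : pvFirstType pre g' with
              | some w => rw [h g', hx]
              | none =>
                have hne : (g == g') = false := by
                  by_cases e : g = g'
                  · subst e; rw [hx] at hft; exact absurd hft (by simp)
                  · simp [e]
                rw [h g', hx, hne]; simp
            by_cases hal : aliases.contains g = true
            · by_cases hbg : aliases.getD g g = g
              · simp [hal, hbg, h g, hft]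
              · have hb : ga.get? (aliases.getD g g) = pvFirstType pre (aliases.getD g g) := h _
                have hbeq : (aliases.getD g g == g) = false := by simp [hbg]
                simp only [hal, hbeq, Bool.true_and, if_false, Bool.false_eq_true, hb]
                cases hx : pvFirstType pre (aliases.getD g g) with
                | some w =>
                  by_cases hw : w = v
                  · subst hw; simp
                  · have : (w == v) = false := by simp [hw]
                    simp [this, ih _ _ _ h', pvActive]
                | none => simp [ih _ _ _ h', pvActive]
            · have hscan : pvScanA ga v g aliases.items = pvScanB pre v g aliases.items :=
                pvScan_eq ga pre v g aliases.items (fun p _ => h p.1)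
              simp only [hal, Bool.false_and, Bool.false_eq_true, if_false, Bool.not_false,
                Bool.true_and, hscan, Bool.false_eq_true]
              cases hs : pvScanB pre v g aliases.items with
              | true => simp
              | false => simp [ih _ _ _ h', pvActive]
          · have : (v != ct) = true := by simp [hv]
            simp [this]
        | none =>
          have hcg : ga.contains g = false := by
            rw [PySem.Dict.contains_eq_isSome_get?, h g, hft]; rfl
          simp only [hcg, Bool.false_eq_true, if_false]
          have h' : ∀ g', (ga.insert g ct).get? g' = pvFirstType (pre ++ [(g, ct)]) g' := by
            intro g'
            rw [pvFirstType_append]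
            by_cases e : g' = g
            · subst e
              rw [PySem.Dict.get?_insert_self, hft]; simp
            · rw [PySem.Dict.get?_insert_of_ne ga ct e, h g']
              have hne : (g == g') = false := by
                by_cases e2 : g = g'
                · exact absurd e2.symm e
                · simp [e2]
              cases hx : pvFirstType pre g' with
              | some w => rfl
              | none => simp [hne]
          by_cases hal : aliases.contains g = true
          · by_cases hbg : aliases.getD g g = g
            · simp [hal, hbg, PySem.Dict.get?_insert_self]
            · have hbeq : (aliases.getD g g == g) = false := by simp [hbg]
              have hb : (ga.insert g ct).get? (aliases.getD g g) = pvFirstType pre (aliases.getD g g) := by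
                rw [PySem.Dict.get?_insert_of_ne ga ct hbg, h _]
              simp only [hal, hbeq, Bool.true_and, if_false, Bool.false_eq_true, hb]
              cases hx : pvFirstType pre (aliases.getD g g) with
              | some w =>
                by_cases hw : w = ct
                · subst hw; simp
                · have : (w == ct) = false := by simp [hw]
                  simp [this, ih _ _ _ h', pvActive]
              | none => simp [ih _ _ _ h', pvActive]
          · have hmem : ∀ p ∈ aliases.items, (ga.insert g ct).get? p.1 = pvFirstType pre p.1 := by
              intro p hp
              have hk : p.1 ∈ aliases.keys := PySem.Dict.mem_keys_of_mem_items aliases hp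
              have hpg : p.1 ≠ g := by
                intro e; apply hal
                rw [PySem.Dict.contains_iff_mem_keys]; exact e ▸ hk
              rw [PySem.Dict.get?_insert_of_ne ga ct hpg, h _]
            have hscan : pvScanA (ga.insert g ct) ct g aliases.items = pvScanB pre ct g aliases.items :=
              pvScan_eq _ pre ct g aliases.items hmem
            simp only [hal, Bool.false_and, Bool.false_eq_true, if_false, Bool.not_false,
              Bool.true_and, hscan]
            cases hs : pvScanB pre ct g aliases.items with
            | true => simp
            | false => simp [ih _ _ _ h', pvActive]

-- B-side: characterisation of the groupTypes dictionary built by B's first pass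
theorem pvSetAdd_ne_nil (s : PySem.Set String) (x : String) : PySem.Set.add s x ≠ [] := by
  show (if s.contains x then s else s ++ [x]) ≠ []
  split
  · rename_i h
    intro e
    rw [e] at h
    simp at h
  · simp

theorem pvGT_inv (entries : List (String × (Option String × String))) :
    ∀ d : PySem.Dict String (PySem.Set String), d.keys.Nodup →
      (∀ g, (d.getD g PySem.Set.empty).Nodup) →
      (∀ g, d.contains g = true ↔ d.getD g PySem.Set.empty ≠ []) →
      (entries.foldl pvGTstep d).keys.Nodup ∧
      (∀ g, ((entries.foldl pvGTstep d).getD g PySem.Set.empty).Nodup) ∧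
      (∀ g, (entries.foldl pvGTstep d).contains g = true ↔
            (entries.foldl pvGTstep d).getD g PySem.Set.empty ≠ []) ∧
      (∀ g t, t ∈ (entries.foldl pvGTstep d).getD g PySem.Set.empty ↔
              t ∈ d.getD g PySem.Set.empty ∨ (g, t) ∈ pvActive entries) := by
  induction entries with
  | nil =>
    intro d h1 h2 h3
    refine ⟨h1, h2, h3, ?_⟩
    intro g t
    simp [pvActive]
  | cons e rest ih =>
    intro d h1 h2 h3
    obtain ⟨nm, ct?, gn⟩ := e
    cases ct? with
    | none =>
      have := ih d h1 h2 h3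
      simpa [pvGTstep, pvActive] using this
    | some t0 =>
      by_cases hg : gn = ""
      · subst hg
        have := ih d h1 h2 h3
        simpa [pvGTstep, pvActive] using this
      · have hgb : (gn == "") = false := by simp [hg]
        have hstep : pvGTstep d (nm, some t0, gn) =
            d.modify gn PySem.Set.empty (fun s => PySem.Set.add s t0) := by
          simp [pvGTstep, hgb]
        have hnd' : (d.modify gn PySem.Set.empty (fun s => PySem.Set.add s t0)).keys.Nodup := by
          rw [PySem.Dict.keys_modify]
          exact PySem.Dict.nodup_keys_insert d gn _ h1
        have hvn' : ∀ g, ((d.modify gn PySem.Set.empty (fun s => PySem.Set.add s t0)).getD g PySem.Set.empty).Nodup := by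
          intro g
          rw [PySem.Dict.getD_modify]
          split
          · exact PySem.Set.nodup_add _ t0 (h2 gn)
          · exact h2 g
        have hct' : ∀ g, (d.modify gn PySem.Set.empty (fun s => PySem.Set.add s t0)).contains g = true ↔
            (d.modify gn PySem.Set.empty (fun s => PySem.Set.add s t0)).getD g PySem.Set.empty ≠ [] := by
          intro g
          rw [PySem.Dict.contains_modify, PySem.Dict.getD_modify]
          split
          · rename_i h
            simp [h, pvSetAdd_ne_nil]
          · rename_i h
            have : (g == gn) = false := by simpa using h
            simp [this, h3 g]
        obtain ⟨c1, c2, c3, c4⟩ := ih _ hnd' hvn' hct'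
        rw [List.foldl_cons, hstep]
        refine ⟨c1, c2, c3, ?_⟩
        intro g t
        rw [c4 g t, PySem.Dict.getD_modify]
        have hact : pvActive ((nm, some t0, gn) :: rest) = (gn, t0) :: pvActive rest := by
          simp [pvActive, hg]
        rw [hact]
        split
        · rename_i h
          subst h
          rw [PySem.Set.mem_add]
          simp only [List.mem_cons, Prod.mk.injEq, true_and]
          tauto
        · rename_i h
          simp only [List.mem_cons, Prod.mk.injEq]
          constructor
          · rintro (h1 | h1)
            · exact Or.inl h1
            · exact Or.inr (Or.inr h1)
          · rintro (h1 | h1 | h1)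
            · exact Or.inl h1
            · exact absurd h1.1 h
            · exact Or.inr h1

theorem pvLen_le_one_mem (s : List String) (hlen : s.length ≤ 1) (a b : String)
    (ha : a ∈ s) (hb : b ∈ s) : a = b := by
  match s with
  | [] => simp at ha
  | [x] =>
    simp at ha hb
    rw [ha, hb]
  | x :: y :: r => simp at hlen

theorem pvNodup_all_eq_len (s : List String) (hnd : s.Nodup)
    (h : ∀ a ∈ s, ∀ b ∈ s, a = b) : s.length ≤ 1 := by
  match s with
  | [] => simp
  | [x] => simp
  | x :: y :: r =>
    exfalso
    have hxy : x ≠ y := by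
      have := List.nodup_cons.mp hnd
      intro e
      exact this.1 (e ▸ List.mem_cons_self)
    exact hxy (h x List.mem_cons_self y (List.mem_cons_of_mem _ List.mem_cons_self))

-- B's verdict computes the same global properties
theorem altB_iff (entries : List (String × (Option String × String))) (aliasList : List (String × String)) :
    ((pvGroupTypes entries).values.any (fun s => decide (1 < PySem.Set.len s)) = false ∧
     (PySem.Dict.ofList aliasList).items.any (fun p =>
        (pvGroupTypes entries).contains p.1 && (pvGroupTypes entries).contains p.2 &&
        !(PySem.Set.inter ((pvGroupTypes entries).getD p.1 PySem.Set.empty)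
                          ((pvGroupTypes entries).getD p.2 PySem.Set.empty)).isEmpty) = false)
    ↔ (pvCons (pvActive entries) ∧ ¬ pvConf (PySem.Dict.ofList aliasList) (pvActive entries)) := by
  obtain ⟨hnd, hvn, hct, hm⟩ := pvGT_inv entries PySem.Dict.empty
    (by exact PySem.Dict.nodup_keys_empty) (by intro g; simp [PySem.Dict.getD_empty, PySem.Set.empty])
    (by intro g; simp [PySem.Dict.contains_empty, PySem.Dict.getD_empty, PySem.Set.empty])
  have hm' : ∀ g t, t ∈ (pvGroupTypes entries).getD g PySem.Set.empty ↔ (g, t) ∈ pvActive entries := by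
    intro g t
    rw [show pvGroupTypes entries = entries.foldl pvGTstep PySem.Dict.empty from rfl, hm g t]
    simp [PySem.Dict.getD_empty, PySem.Set.empty]
  constructor
  · rintro ⟨hlen, hconf⟩
    constructor
    · rintro ⟨g1, t1⟩ hp ⟨g2, t2⟩ hq heq
      simp only at heq
      subst heq
      show t1 = t2
      have ht1 : t1 ∈ (pvGroupTypes entries).getD g1 PySem.Set.empty := (hm' g1 t1).mpr hp
      have ht2 : t2 ∈ (pvGroupTypes entries).getD g1 PySem.Set.empty := (hm' g1 t2).mpr hq
      have hcg : (pvGroupTypes entries).contains g1 = true :=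
        (hct g1).mpr (List.ne_nil_of_mem ht1)
      obtain ⟨v, hv⟩ : ∃ v, (pvGroupTypes entries).get? g1 = some v := by
        rw [PySem.Dict.contains_eq_isSome_get?] at hcg
        exact Option.isSome_iff_exists.mp hcg
      have hvmem : v ∈ (pvGroupTypes entries).values := by
        have := PySem.Dict.mem_items_of_get?_eq_some _ hv
        exact List.mem_map.mpr ⟨(g1, v), this, rfl⟩
      have hvd : (pvGroupTypes entries).getD g1 PySem.Set.empty = v :=
        PySem.Dict.getD_of_get?_eq_some _ _ hv
      rw [List.any_eq_false] at hlen
      have := hlen v hvmem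
      have hvl : v.length ≤ 1 := by
        simp [PySem.Set.len] at this
        exact this
      rw [hvd] at ht1 ht2
      exact pvLen_le_one_mem v hvl t1 t2 ht1 ht2
    · rintro ⟨p, hp, t, h1, h2⟩
      have hx1 : t ∈ (pvGroupTypes entries).getD p.1 PySem.Set.empty := (hm' p.1 t).mpr h1
      have hx2 : t ∈ (pvGroupTypes entries).getD p.2 PySem.Set.empty := (hm' p.2 t).mpr h2
      rw [List.any_eq_false] at hconf
      have := hconf p hp
      have hc1 : (pvGroupTypes entries).contains p.1 = true := (hct p.1).mpr (List.ne_nil_of_mem hx1)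
      have hc2 : (pvGroupTypes entries).contains p.2 = true := (hct p.2).mpr (List.ne_nil_of_mem hx2)
      have hint : t ∈ PySem.Set.inter ((pvGroupTypes entries).getD p.1 PySem.Set.empty)
          ((pvGroupTypes entries).getD p.2 PySem.Set.empty) :=
        (PySem.Set.mem_inter _ _ t).mpr ⟨hx1, hx2⟩
      have hne := List.ne_nil_of_mem hint
      rw [hc1, hc2] at this
      simp at this
      exact hne this
  · rintro ⟨hcons, hconf⟩
    constructor
    · rw [List.any_eq_false]
      intro v hvmem
      obtain ⟨p, hpit, hpv⟩ := List.mem_map.mp hvmem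
      have hget := PySem.Dict.get?_of_mem_items _ hpit hnd
      have hvd : (pvGroupTypes entries).getD p.1 PySem.Set.empty = p.2 :=
        PySem.Dict.getD_of_get?_eq_some _ _ hget
      have hvnp : v.Nodup := by
        rw [← hpv, ← hvd]
        exact hvn p.1
      have hall : ∀ a ∈ v, ∀ b ∈ v, a = b := by
        intro a ha b hb
        rw [← hpv, ← hvd] at ha hb
        exact hcons (p.1, a) ((hm' p.1 a).mp ha) (p.1, b) ((hm' p.1 b).mp hb) rfl
      have := pvNodup_all_eq_len v hvnp hall
      simp [PySem.Set.len]
      omega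
    · rw [List.any_eq_false]
      intro p hp
      by_cases hc1 : (pvGroupTypes entries).contains p.1 = true
      · by_cases hc2 : (pvGroupTypes entries).contains p.2 = true
        · have hemp : (PySem.Set.inter ((pvGroupTypes entries).getD p.1 PySem.Set.empty)
              ((pvGroupTypes entries).getD p.2 PySem.Set.empty)).isEmpty = true := by
            rw [List.isEmpty_iff]
            by_contra hne
            obtain ⟨x, hx⟩ := List.exists_mem_of_ne_nil _ hne
            have := (PySem.Set.mem_inter _ _ x).mp hx
            exact hconf ⟨p, hp, x, (hm' p.1 x).mp this.1, (hm' p.2 x).mp this.2⟩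
          rw [List.isEmpty_iff] at hemp
          show ¬((pvGroupTypes entries).contains p.1 && (pvGroupTypes entries).contains p.2 &&
            !(PySem.Set.inter ((pvGroupTypes entries).getD p.1 PySem.Set.empty)
              ((pvGroupTypes entries).getD p.2 PySem.Set.empty)).isEmpty) = true
          rw [hc1, hc2, hemp]
          simp
        · simp [Bool.eq_false_iff.mpr hc2]
      · simp [Bool.eq_false_iff.mpr hc1]

-- ===== VERDICT (by name: the statement is the Claim_ definition above) =====
theorem isValidTypeGroupAssignment_spec : Claim_equal_isValidTypeGroupAssignment := by
  intro driverNames combo typeGroupAliases _ hpre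
  unfold Spec_isValidTypeGroupAssignment isValidTypeGroupAssignment isValidTypeGroupAssignment_alt
  dsimp only
  rw [pvGoA_eq_goB (PySem.Dict.ofList typeGroupAliases) (driverNames.zip combo) []
        PySem.Dict.empty PySem.Dict.empty
        (fun g => by rw [PySem.Dict.get?_empty]; rfl)]
  have hval := pvGoB_iff_valid (PySem.Dict.ofList typeGroupAliases)
      (PySem.Dict.nodup_keys_ofList typeGroupAliases) hpre
      (pvActive (driverNames.zip combo)) [] (by intro p hp; simp at hp) (by
        rintro ⟨p, _, t, ht, _⟩; simp at ht)
  rw [List.nil_append] at hval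
  have halt := altB_iff (driverNames.zip combo) typeGroupAliases
  by_cases hv : pvCons (pvActive (driverNames.zip combo)) ∧
      ¬ pvConf (PySem.Dict.ofList typeGroupAliases) (pvActive (driverNames.zip combo))
  · obtain ⟨ha1, ha2⟩ := halt.mpr hv
    rw [hval.mpr hv, ha1, ha2]
    simp
  · have h1 : pvGoB (PySem.Dict.ofList typeGroupAliases) [] (pvActive (driverNames.zip combo)) = false := by
      cases h : pvGoB (PySem.Dict.ofList typeGroupAliases) [] (pvActive (driverNames.zip combo)) with
      | true => exact absurd (hval.mp h) hv
      | false => rfl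
    rw [h1]
    cases ha : (pvGroupTypes (driverNames.zip combo)).values.any (fun s => decide (1 < PySem.Set.len s)) with
    | true => simp [ha]
    | false =>
      cases hb : (PySem.Dict.ofList typeGroupAliases).items.any (fun p =>
          (pvGroupTypes (driverNames.zip combo)).contains p.1 &&
          (pvGroupTypes (driverNames.zip combo)).contains p.2 &&
          !(PySem.Set.inter ((pvGroupTypes (driverNames.zip combo)).getD p.1 PySem.Set.empty)
            ((pvGroupTypes (driverNames.zip combo)).getD p.2 PySem.Set.empty)).isEmpty) with
      | true => simp [ha, hb]
      | false => exact absurd (halt.mp ⟨ha, hb⟩) hv
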